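-- pv_equiv track=rewrite | github.com/dkvlko/Dheeraj-AI-programs-github | liv_code/Data-Processing-ForMoodle-TABText/processors/english_2.py | process_cloze
-- ===== SOURCE A (Python) =====
-- def process_cloze(data):
--     START_TOKEN = "{{c1::"
--     END_TOKEN = "}}"
--     BLANK_TOKEN = "$Blankspace$"
--     FIB_PREFIX = "$FIB$"
--
--     for row in data:
--         fib_list = []
--
--         for col_idx, cell in enumerate(row):
--             if not isinstance(cell, str):
--                 continue
--
--             while START_TOKEN in cell:
--                 start = cell.find(START_TOKEN)
--                 end = cell.find(END_TOKEN, start)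
--
--                 # Safety check: malformed cloze
--                 if end == -1:
--                     break
--
--                 # Extract answer text
--                 answer = cell[start + len(START_TOKEN):end]
--                 fib_list.append(FIB_PREFIX + answer)
--
--                 # Replace cloze with blankspace
--                 cell = (
--                     cell[:start]
--                     + BLANK_TOKEN
--                     + cell[end + len(END_TOKEN):]
--                 )
--
--             # Update the modified cell back into row
--             row[col_idx] = cell
--
--         # ✅ KEY CHANGE HERE
--         if fib_list:
--             row.extend(fib_list)   # instead of append()
--
--     return data
-- ===== SOURCE B (Python) =====
-- def process_cloze(data):
--     BLANK_TOKEN = "$Blankspace$"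
--
--     for row in data:
--         fib_list = []
--
--         for col_idx, cell in enumerate(row):
--             if not isinstance(cell, str):
--                 continue
--
--             # single left-to-right scan: copy chars until a "{{c1::" starts,
--             # then split the remainder at the first "}}"
--             out = []
--             cs = cell
--             while cs:
--                 if cs.startswith("{{c1::"):
--                     body, sep, rest = cs[6:].partition("}}")
--                     if not sep:          # unterminated cloze: keep the rest verbatim
--                         out.append(cs)
--                         break
--                     fib_list.append("$FIB$" + body)
--                     out.append(BLANK_TOKEN)
--                     cs = rest
--                 else:
--                     out.append(cs[0])
--                     cs = cs[1:]
--             row[col_idx] = "".join(out)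
--
--         if fib_list:
--             row.extend(fib_list)
--
--     return data
-- ===== Notes on version B (the rewrite author's own statement) =====
-- stated objective: simpler
-- what changed: The repeated whole-cell find/slice-and-rescan while loop is replaced by a single left-to-right scan that copies characters and, whenever a '{{c1::' starts, splits the remainder at the first '}}' via str.partition; the cell is processed in one logical pass instead of restarting the search on the rebuilt string after every replacement.
import Mathlib
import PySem

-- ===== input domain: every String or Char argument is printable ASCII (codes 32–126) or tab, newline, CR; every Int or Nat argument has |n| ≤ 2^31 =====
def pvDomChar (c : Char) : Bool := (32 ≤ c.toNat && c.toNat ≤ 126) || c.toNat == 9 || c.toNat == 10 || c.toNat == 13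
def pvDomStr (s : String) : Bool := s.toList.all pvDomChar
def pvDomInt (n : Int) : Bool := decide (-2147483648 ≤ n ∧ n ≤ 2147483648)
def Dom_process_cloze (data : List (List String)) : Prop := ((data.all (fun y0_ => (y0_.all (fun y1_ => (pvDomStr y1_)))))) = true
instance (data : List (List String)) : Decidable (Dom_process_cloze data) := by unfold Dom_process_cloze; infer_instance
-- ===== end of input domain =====

-- B replaces A's repeated whole-cell find/slice-and-rescan while loop by a single
-- left-to-right scan that splits the remainder at the first "}}" (str.partition)
-- whenever a "{{c1::" starts — objective: simpler, one pass per cell.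
-- (A mutates its argument rows in place; the equivalence proved here is about the return value.)

-- the four string constants of the Python, as character lists
def pvSTART : List Char := ['{', '{', 'c', '1', ':', ':']
def pvEND : List Char := ['}', '}']
def pvBLANK : List Char := ['$', 'B', 'l', 'a', 'n', 'k', 's', 'p', 'a', 'c', 'e', '$']
def pvFIB : List Char := ['$', 'F', 'I', 'B', '$']

-- ===== PORT A =====
-- A's inner `while START_TOKEN in cell` loop, on the cell's character list
-- (fuel is only a totality guard: each iteration consumes a "{{c1::" occurrence,
-- so `cell.length + 1` iterations are never exhausted).
def pvLoopA (fuel : Nat) (cell : List Char) (fibs : List (List Char)) :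
    List Char × List (List Char) :=
  match fuel with
  | 0 => (cell, fibs)
  | fuel + 1 =>
    if PySem.Chars.isIn pvSTART cell then
      let start := PySem.Chars.find cell pvSTART
      let end_ := PySem.Chars.findFrom cell pvEND start none
      if end_ = -1 then (cell, fibs)                      -- malformed cloze: break
      else
        let answer := PySem.List.slice cell (some (start + 6)) (some end_)
        pvLoopA fuel
          (PySem.List.slice cell none (some start) ++ pvBLANK ++
            PySem.List.slice cell (some (end_ + 2)) none)
          (fibs ++ [pvFIB ++ answer])
    else (cell, fibs)

-- A's per-cell step of the fold over a row's cells, threading fib_list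
-- (every cell is a `str` here, so the `isinstance` guard never skips)
def pvStepA : List String × List (List Char) → String → List String × List (List Char) :=
  fun st cell =>
    let r := pvLoopA (cell.toList.length + 1) cell.toList st.2
    (st.1 ++ [String.ofList r.1], r.2)

-- A's body for one row: the cell loop, then `if fib_list: row.extend(fib_list)`
def pvRowA (row : List String) : List String :=
  let res := row.foldl pvStepA ([], [])
  if res.2.isEmpty then res.1 else res.1 ++ res.2.map (fun f => String.ofList f)

def process_cloze (data : List (List String)) : List (List String) :=
  data.map pvRowA

-- ===== PORT B =====
-- Source B's `cs[6:].partition("}}")` : (before, found?, after)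
def pvPart : List Char → List Char × Bool × List Char
  | [] => ([], false, [])
  | c :: cs =>
    if pvEND.isPrefixOf (c :: cs) then ([], true, cs.tail)
    else
      let r := pvPart cs
      (c :: r.1, r.2.1, r.2.2)

-- (termination bound for pvScan, cited in its decreasing_by)
theorem pvPart_len (l : List Char) : (pvPart l).2.2.length ≤ l.length := by
  induction l with
  | nil => simp [pvPart]
  | cons c cs ih =>
    simp only [pvPart]
    split
    · cases cs
      · simp
      · simp
        omega
    · simpa using Nat.le_succ_of_le ih

-- Source B's single left-to-right scan of one cell: copy characters until a "{{c1::"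
-- starts, then partition the remainder at the first "}}"
def pvScan : List Char → List Char × List (List Char)
  | [] => ([], [])
  | c :: rest =>
    if pvSTART.isPrefixOf (c :: rest) then
      let pr := pvPart ((c :: rest).drop 6)
      if pr.2.1 then
        let r := pvScan pr.2.2
        (pvBLANK ++ r.1, (pvFIB ++ pr.1) :: r.2)
      else (c :: rest, [])                                -- unterminated cloze: keep verbatim
    else
      let r := pvScan rest
      (c :: r.1, r.2)
  termination_by l => l.length
  decreasing_by
  · have h := pvPart_len ((c :: rest).drop 6)
    simp only [List.length_drop, List.length_cons] at h ⊢
    omega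
  · simp

-- B's per-cell step: same outer shape, per-cell fibs appended
def pvStepB : List String × List (List Char) → String → List String × List (List Char) :=
  fun st cell =>
    let r := pvScan cell.toList
    (st.1 ++ [String.ofList r.1], st.2 ++ r.2)

def pvRowB (row : List String) : List String :=
  let res := row.foldl pvStepB ([], [])
  if res.2.isEmpty then res.1 else res.1 ++ res.2.map (fun f => String.ofList f)

def process_cloze_alt (data : List (List String)) : List (List String) :=
  data.map pvRowB

-- ===== PRECONDITION & SPEC =====
def Spec_process_cloze (data : List (List String)) (out : List (List String)) : Prop := out = process_cloze_alt data
instance (data : List (List String)) (out : List (List String)) : Decidable (Spec_process_cloze data out) := by unfold Spec_process_cloze; infer_instance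

-- ===== CLAIM (what is proved, stated in full; the proofs are below) =====
def Claim_equal_process_cloze : Prop := ∀ (data : List (List String)), Dom_process_cloze data → Spec_process_cloze data (process_cloze data)

-- ===== LEMMAS AND PROOFS =====

theorem pvPart_no (l : List Char) (h : ∀ i, ¬ pvEND <+: l.drop i) :
    pvPart l = (l, false, []) := by
  induction l with
  | nil => rfl
  | cons c cs ih =>
    have h0 : ¬ pvEND.isPrefixOf (c :: cs) := by
      simpa [List.isPrefixOf_iff_prefix] using h 0
    rw [pvPart, if_neg h0, ih (fun i => by simpa using h (i + 1))]

theorem pvPart_yes (l : List Char) (j : Nat) (hj : pvEND <+: l.drop j)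
    (hmin : ∀ i < j, ¬ pvEND <+: l.drop i) :
    pvPart l = (l.take j, true, l.drop (j + 2)) := by
  induction l generalizing j with
  | nil => simp [pvEND] at hj
  | cons c cs ih =>
    cases j with
    | zero =>
      have h0 : pvEND.isPrefixOf (c :: cs) := by
        simpa [List.isPrefixOf_iff_prefix] using hj
      rw [pvPart, if_pos h0]
      simp [List.drop_one]
    | succ j' =>
      have h0 : ¬ pvEND.isPrefixOf (c :: cs) := by
        simpa [List.isPrefixOf_iff_prefix] using hmin 0 (Nat.succ_pos _)
      rw [pvPart, if_neg h0,
        ih j' (by simpa using hj) (fun i hi => by simpa using hmin (i + 1) (by omega))]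
      simp [List.drop_succ_cons, List.take_succ_cons]

theorem pvScan_cons_no (c : Char) (l : List Char) (h : ¬ pvSTART <+: (c :: l)) :
    pvScan (c :: l) = (c :: (pvScan l).1, (pvScan l).2) := by
  rw [pvScan, if_neg (by simpa [List.isPrefixOf_iff_prefix] using h)]

theorem pvScan_copy (j : Nat) (l : List Char) (hj : j ≤ l.length)
    (h : ∀ i < j, ¬ pvSTART <+: l.drop i) :
    pvScan l = (l.take j ++ (pvScan (l.drop j)).1, (pvScan (l.drop j)).2) := by
  induction j generalizing l with
  | zero => simp
  | succ j' ih =>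
    cases l with
    | nil => simp at hj
    | cons c cs =>
      rw [pvScan_cons_no c cs (by simpa using h 0 (Nat.succ_pos _)),
        ih cs (by simpa using hj) (fun i hi => by simpa using h (i + 1) (by omega))]
      simp

theorem pvScan_start_no_end (l : List Char) (hs : pvSTART <+: l)
    (he : ∀ i, ¬ pvEND <+: (l.drop 6).drop i) :
    pvScan l = (l, []) := by
  cases l with
  | nil => simp [pvSTART] at hs
  | cons c rest =>
    rw [pvScan, if_pos (by simpa [List.isPrefixOf_iff_prefix] using hs)]
    simp only [pvPart_no _ he]
    rfl

theorem pvScan_start_end (l : List Char) (hs : pvSTART <+: l) (e : Nat)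
    (he : pvEND <+: (l.drop 6).drop e) (hmin : ∀ i < e, ¬ pvEND <+: (l.drop 6).drop i) :
    pvScan l = (pvBLANK ++ (pvScan ((l.drop 6).drop (e + 2))).1,
      (pvFIB ++ (l.drop 6).take e) :: (pvScan ((l.drop 6).drop (e + 2))).2) := by
  cases l with
  | nil => simp [pvSTART] at hs
  | cons c rest =>
    rw [pvScan, if_pos (by simpa [List.isPrefixOf_iff_prefix] using hs)]
    simp only [pvPart_yes _ e he hmin, List.drop_drop]
    rw [if_pos trivial]

def pvClean (p : List Char) : Prop :=
  (∀ i, ¬ pvSTART <+: p.drop i) ∧ (p = [] ∨ p.getLast? = some '$')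

theorem pvSTART_no_dollar : ∀ (m : Nat) (h : m < 6), pvSTART[m]'(by simp [pvSTART]; omega) ≠ '$' := by decide

theorem pvClean_nil : pvClean [] := ⟨fun i => by simp [pvSTART], Or.inl rfl⟩

theorem pvClean_ext (p : List Char) (hp : pvClean p) (t : List Char) (i : Nat)
    (hi : i < p.length) : ¬ pvSTART <+: (p.drop i ++ t) := by
  intro h
  by_cases h6 : i + 6 ≤ p.length
  · exact hp.1 i ((List.isPrefix_append_of_length (by simp [pvSTART]; omega)).mp h)
  · rcases hp.2 with rfl | hlast
    · simp at hi
    · have hm6 : p.length - 1 - i < 6 := by omega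
      have hmx : p.length - 1 - i < (p.drop i ++ t).length := by simp; omega
      have h1 : (p.drop i ++ t)[p.length - 1 - i]'hmx
          = pvSTART[p.length - 1 - i]'(by simp [pvSTART]; omega) :=
        (List.IsPrefix.getElem h _).symm
      have h2 : (p.drop i ++ t)[p.length - 1 - i]'hmx = p[p.length - 1]'(by omega) := by
        rw [List.getElem_append_left (by simp; omega), List.getElem_drop]
        congr 1
        omega
      have h3 : p[p.length - 1]'(by omega) = '$' := by
        have : p[p.length - 1]? = some '$' := by
          rw [← List.getLast?_eq_getElem?, hlast]
        rw [List.getElem?_eq_some_iff] at this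
        exact this.choose_spec
      exact pvSTART_no_dollar _ hm6 (by rw [← h1, h2, h3])

theorem pvBLANK_no_lbrace : ∀ (k : Nat) (h : k < 12), pvBLANK[k]'(by simp [pvBLANK]; omega) ≠ '{' := by decide

theorem pvClean_step (p tail : List Char) (j : Nat) (hp : pvClean p)
    (hmin : ∀ i < j, ¬ pvSTART <+: tail.drop i) (hj : j ≤ tail.length) :
    pvClean (p ++ (tail.take j ++ pvBLANK)) := by
  constructor
  · intro i h
    have hQ : (tail.take j).length = j := by simp; omega
    by_cases hi1 : i < p.length
    · rw [List.drop_append_of_le_length (by omega)] at h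
      exact pvClean_ext p hp _ i hi1 h
    · have hk : i = p.length + (i - p.length) := by omega
      rw [hk, List.drop_length_add_append] at h
      set k := i - p.length with hkdef
      by_cases hi2 : k < j
      · rw [List.drop_append_of_le_length (by omega)] at h
        by_cases h6 : k + 6 ≤ j
        · have h' : pvSTART <+: (tail.take j).drop k :=
            (List.isPrefix_append_of_length (by simp [pvSTART, List.length_drop]; omega)).mp h
          rw [List.drop_take] at h'
          exact hmin k hi2 (h'.trans (List.take_prefix _ _))
        · -- straddle into pvBLANK: char at index j - k is '$'
          have hm6 : j - k < 6 := by omega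
          have hmx : j - k < ((tail.take j).drop k ++ pvBLANK).length := by
            simp only [List.length_append, List.length_drop, hQ]
            simp [pvBLANK]
          have h1 : ((tail.take j).drop k ++ pvBLANK)[j - k]'hmx
              = pvSTART[j - k]'(by simp [pvSTART]; omega) :=
            (List.IsPrefix.getElem h _).symm
          have h2 : ((tail.take j).drop k ++ pvBLANK)[j - k]'hmx = '$' := by
            rw [List.getElem_append_right (by simp only [List.length_drop, hQ]; omega)]
            simp only [List.length_drop, hQ]
            simp [pvBLANK]
          exact pvSTART_no_dollar _ hm6 (by rw [← h1, h2])
      · -- inside pvBLANK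
        have hk2 : k = (tail.take j).length + (k - j) := by omega
        rw [hk2, List.drop_length_add_append] at h
        by_cases h12 : k - j < 12
        · have hne : pvBLANK.drop (k - j) ≠ [] := by
            intro hc
            have := congrArg List.length hc
            simp [pvBLANK] at this
            omega
          have hx0 : 0 < (pvBLANK.drop (k - j)).length := by
            cases hd : pvBLANK.drop (k - j) with
            | nil => exact absurd hd hne
            | cons a b => simp
          have h1 : (pvBLANK.drop (k - j))[0]'hx0 = pvSTART[0]'(by simp [pvSTART]) :=
            (List.IsPrefix.getElem h (by simp [pvSTART])).symm
          have h2 : (pvBLANK.drop (k - j))[0]'hx0 = pvBLANK[k - j]'(by simp [pvBLANK]; omega) := by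
            rw [List.getElem_drop]
            simp
          exact pvBLANK_no_lbrace (k - j) h12 (by rw [← h2, h1]; rfl)
        · have : pvBLANK.drop (k - j) = [] := by
            apply List.drop_eq_nil_of_le
            simp [pvBLANK]; omega
          rw [this, List.prefix_nil] at h
          simp [pvSTART] at h
  · right
    rw [List.getLast?_append_of_ne_nil _ (by simp [pvBLANK]),
      List.getLast?_append_of_ne_nil _ (by simp [pvBLANK])]
    rfl

theorem pvFind_eq (s sub : List Char) (j : Nat)
    (hj : sub <+: s.drop j) (hmin : ∀ i < j, ¬ sub <+: s.drop i) :
    PySem.Chars.find s sub = (j : Int) := by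
  have hinf : sub <:+: s := by
    rw [← PySem.Chars.isIn_iff_infix, ← PySem.Chars.exists_prefix_drop_iff_isIn]
    exact ⟨j, hj⟩
  have hnn : 0 ≤ PySem.Chars.find s sub := (PySem.Chars.find_nonneg_iff _ _).mpr hinf
  obtain ⟨h1, h2⟩ := PySem.Chars.find_spec hnn
  rcases lt_trichotomy (PySem.Chars.find s sub).toNat j with h | h | h
  · exact absurd h1 (hmin _ h)
  · omega
  · exact absurd hj (h2 j h)

theorem pvSTART_no_rbrace : ∀ (m : Nat) (h : m < 6), pvSTART[m]'(by simp [pvSTART]; omega) ≠ '}' := by decide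

theorem pvG (fuel : Nat) : ∀ (tail : List Char), tail.length ≤ fuel →
    ∀ (p : List Char) (fibs : List (List Char)), pvClean p →
    pvLoopA fuel (p ++ tail) fibs = (p ++ (pvScan tail).1, fibs ++ (pvScan tail).2) := by
  induction fuel with
  | zero =>
    intro tail hlen p fibs hp
    have : tail = [] := List.eq_nil_of_length_eq_zero (by omega)
    subst this
    simp [pvLoopA, pvScan]
  | succ fuel ih =>
    intro tail hlen p fibs hp
    by_cases hin : PySem.Chars.isIn pvSTART tail = true
    · -- START occurs in tail; j = index of first occurrence
      have hinf : pvSTART <:+: tail := (PySem.Chars.isIn_iff_infix _ _).mp hin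
      have hj0 : 0 ≤ PySem.Chars.find tail pvSTART := (PySem.Chars.find_nonneg_iff _ _).mpr hinf
      obtain ⟨hj1, hj2⟩ := PySem.Chars.find_spec hj0
      set j := (PySem.Chars.find tail pvSTART).toNat with hjdef
      have hj6 : j + 6 ≤ tail.length := by
        have := hj1.length_le
        simp [pvSTART, List.length_drop] at this
        omega
      -- find on the whole cell
      have hwhole : PySem.Chars.find (p ++ tail) pvSTART = ((p.length + j : Nat) : Int) := by
        apply pvFind_eq
        · rw [List.drop_length_add_append]
          exact hj1
        · intro i hi
          by_cases hip : i < p.length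
          · rw [List.drop_append_of_le_length (by omega)]
            exact pvClean_ext p hp tail i hip
          · have hk : i = p.length + (i - p.length) := by omega
            rw [hk, List.drop_length_add_append]
            exact hj2 _ (by omega)
      have hinw : PySem.Chars.isIn pvSTART (p ++ tail) = true := by
        rw [← PySem.Chars.exists_prefix_drop_iff_isIn]
        exact ⟨p.length + j, by rw [List.drop_length_add_append]; exact hj1⟩
      rw [pvLoopA, if_pos hinw]
      simp only [hwhole]
      rw [PySem.Chars.findFrom_natCast _ _ _ (by simp; omega), List.drop_length_add_append]
      by_cases hend : PySem.Chars.find (tail.drop j) pvEND = -1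
      · -- no "}}" after the first START: A breaks, B keeps the tail verbatim
        have hnoe : ∀ i, ¬ pvEND <+: (tail.drop j).drop i := by
          intro i hpre
          have : PySem.Chars.isIn pvEND (tail.drop j) = true := by
            rw [← PySem.Chars.exists_prefix_drop_iff_isIn]
            exact ⟨i, hpre⟩
          rw [PySem.Chars.find_eq_neg_one_iff] at hend
          exact hend ((PySem.Chars.isIn_iff_infix _ _).mp this)
        rw [if_pos (by rw [hend]; rfl)]
        have hscan : pvScan tail = (tail, []) := by
          rw [pvScan_copy j tail (by omega) hj2,
            pvScan_start_no_end _ hj1 (fun i => by rw [List.drop_drop]; exact hnoe (6 + i))]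
          simp
        rw [hscan]
        simp
      · -- "}}" found at offset fN in tail.drop j
        have hf0 : 0 ≤ PySem.Chars.find (tail.drop j) pvEND := by
          have := PySem.Chars.neg_one_le_find (tail.drop j) pvEND
          omega
        obtain ⟨he1, he2⟩ := PySem.Chars.find_spec hf0
        set fN := (PySem.Chars.find (tail.drop j) pvEND).toNat with hfdef
        have hfle : fN ≤ (tail.drop j).length := by
          have := PySem.Chars.find_le_length (tail.drop j) pvEND
          simp [List.length_drop] at this ⊢
          omega
        have h6 : 6 ≤ fN := by
          by_contra hcon
          have h6' : fN < 6 := by omega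
          have hx0 : 0 < ((tail.drop j).drop fN).length := by
            have := he1.length_le
            simp [pvEND] at this
            simp
            omega
          have hc1 : ((tail.drop j).drop fN)[0]'hx0 = '}' :=
            (List.IsPrefix.getElem he1 (show 0 < pvEND.length by simp [pvEND])).symm
          have hc2 : ((tail.drop j).drop fN)[0]'hx0 = (tail.drop j)[fN]'(by simp; omega) := by
            rw [List.getElem_drop]
            simp
          have hc3 : (tail.drop j)[fN]'(by simp; omega) = pvSTART[fN]'(by simp [pvSTART]; omega) :=
            (List.IsPrefix.getElem hj1 (by simp [pvSTART]; omega)).symm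
          exact pvSTART_no_rbrace fN h6' (by rw [← hc3, ← hc2, hc1])
        have hjf2 : j + fN + 2 ≤ tail.length := by
          have := he1.length_le
          simp [pvEND, List.length_drop] at this
          omega
        have hfcast : PySem.Chars.find (tail.drop j) pvEND = (fN : Int) := by omega
        rw [hfcast]
        rw [if_neg (show ¬((fN : Int) = -1) from by omega)]
        rw [if_neg (show ¬(((p.length + j : Nat) : Int) + (fN : Int) = -1) from by
          push_cast; omega)]
        -- the three slices
        have hs1 : PySem.List.slice (p ++ tail) none (some ((p.length + j : Nat) : Int))
            = p ++ tail.take j := by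
          rw [PySem.List.slice_to_natCast, List.take_length_add_append]
        have hs2 : PySem.List.slice (p ++ tail) (some (((p.length + j : Nat) : Int) + 6))
            (some (((p.length + j : Nat) : Int) + (fN : Int)))
            = (tail.drop (j + 6)).take (fN - 6) := by
          have c1 : ((p.length + j : Nat) : Int) + 6 = ((p.length + (j + 6) : Nat) : Int) := by
            push_cast; ring
          have c2 : ((p.length + j : Nat) : Int) + (fN : Int) = ((p.length + (j + fN) : Nat) : Int) := by
            push_cast; ring
          rw [c1, c2, PySem.List.slice_natCast]
          rw [show (p ++ tail).drop (p.length + (j + 6)) = tail.drop (j + 6) from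
            List.drop_length_add_append _]
          congr 1
          omega
        have hs3 : PySem.List.slice (p ++ tail) (some ((((p.length + j : Nat) : Int) + (fN : Int)) + 2)) none
            = tail.drop (j + fN + 2) := by
          have c1 : (((p.length + j : Nat) : Int) + (fN : Int)) + 2
              = ((p.length + (j + fN + 2) : Nat) : Int) := by push_cast; ring
          rw [c1, PySem.List.slice_from_natCast, List.drop_length_add_append]
        rw [hs1, hs2, hs3]
        -- recursive step via the induction hypothesis
        have harr : (p ++ tail.take j) ++ pvBLANK ++ tail.drop (j + fN + 2)
            = (p ++ (tail.take j ++ pvBLANK)) ++ tail.drop (j + fN + 2) := by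
          simp [List.append_assoc]
        rw [harr, ih (tail.drop (j + fN + 2)) (by simp; omega) _ _
          (pvClean_step p tail j hp hj2 (by omega))]
        -- scan side
        have hscan : pvScan tail
            = (tail.take j ++ (pvBLANK ++ (pvScan (tail.drop (j + fN + 2))).1),
               (pvFIB ++ (tail.drop (j + 6)).take (fN - 6)) :: (pvScan (tail.drop (j + fN + 2))).2) := by
          rw [pvScan_copy j tail (by omega) hj2]
          rw [pvScan_start_end (tail.drop j) hj1 (fN - 6)
            (by rw [List.drop_drop, List.drop_drop, show j + (6 + (fN - 6)) = j + fN by omega]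
                rw [← List.drop_drop]
                exact he1)
            (fun i hi => by
                rw [List.drop_drop, List.drop_drop, show j + (6 + i) = j + (6 + i) from rfl]
                rw [← List.drop_drop]
                exact he2 (6 + i) (by omega))]
          rw [List.drop_drop, List.drop_drop, List.drop_drop,
            show j + (6 + (fN - 6 + 2)) = j + fN + 2 by omega, show j + 6 = j + 6 from rfl]
        rw [hscan]
        simp
    · -- no START in tail (hence none in the whole cell): both sides leave it unchanged
      have hnone : ∀ i, ¬ pvSTART <+: tail.drop i := by
        intro i hpre
        exact hin (by rw [← PySem.Chars.exists_prefix_drop_iff_isIn]; exact ⟨i, hpre⟩)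
      have hinw : ¬ PySem.Chars.isIn pvSTART (p ++ tail) = true := by
        intro hw
        rw [← PySem.Chars.exists_prefix_drop_iff_isIn] at hw
        obtain ⟨i, hpre⟩ := hw
        by_cases hip : i < p.length
        · rw [List.drop_append_of_le_length (by omega)] at hpre
          exact pvClean_ext p hp tail i hip hpre
        · rw [show i = p.length + (i - p.length) by omega, List.drop_length_add_append] at hpre
          exact hnone _ hpre
      rw [pvLoopA, if_neg hinw]
      have hscan : pvScan tail = (tail, []) := by
        rw [pvScan_copy tail.length tail le_rfl (fun i hi => hnone i)]
        simp [pvScan]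
      rw [hscan]
      simp

theorem pvCell (cl : List Char) (fibs : List (List Char)) :
    pvLoopA (cl.length + 1) cl fibs = ((pvScan cl).1, fibs ++ (pvScan cl).2) := by
  have h := pvG (cl.length + 1) cl (by omega) [] fibs pvClean_nil
  simpa using h

theorem pvFold_eq (row : List String) : ∀ (acc : List String) (fibs : List (List Char)),
    row.foldl pvStepA (acc, fibs) = row.foldl pvStepB (acc, fibs) := by
  induction row with
  | nil => intro acc fibs; rfl
  | cons c cs ih =>
    intro acc fibs
    simp only [List.foldl_cons, pvStepA, pvStepB, pvCell]
    exact ih _ _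

theorem pvRow_eq (row : List String) : pvRowA row = pvRowB row := by
  unfold pvRowA pvRowB
  rw [pvFold_eq]

-- ===== VERDICT (by name: the statement is the Claim_ definition above) =====
theorem process_cloze_spec : Claim_equal_process_cloze := by
  intro data _
  unfold Spec_process_cloze process_cloze process_cloze_alt
  exact List.map_congr_left fun r _ => pvRow_eq r
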